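-- pv_equiv track=rewrite | github.com/rainerschuster/wikipedia-markdown-generator | scrape-vital-articles.py | is_valid_article_link
-- ===== SOURCE A (Python) =====
-- def is_valid_article_link(href: str) -> bool:
--     """
--     Check if a link is a valid Wikipedia article link.
--     Filters out meta pages, navigation links, etc.
--     """
--     if not href or not href.startswith('/wiki/'):
--         return False
--
--     # Exclude Wikipedia meta pages and special pages
--     excluded_prefixes = [
--         '/wiki/Wikipedia:',
--         '/wiki/Help:',
--         '/wiki/Category:',
--         '/wiki/File:',
--         '/wiki/Template:',
--         '/wiki/Template_talk:',  # Template talk pages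
--         '/wiki/Portal:',
--         '/wiki/Portal_talk:',
--         '/wiki/Special:',
--         '/wiki/Talk:',
--         '/wiki/User:',
--         '/wiki/User_talk:',
--         '/wiki/Wikipedia_talk:',
--         '/wiki/MediaWiki:',
--         '/wiki/MediaWiki_talk:',
--         '/wiki/Module:',
--         '/wiki/Module_talk:',
--         '/wiki/Draft:',
--         '/wiki/Draft_talk:',
--     ]
--
--     for prefix in excluded_prefixes:
--         if href.startswith(prefix):
--             return False
--
--     # Exclude anchor links
--     if '#' in href and href.index('#') < len(href) - 1:
--         # Allow links with anchors only if the main article is included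
--         href = href.split('#')[0]
--
--     return True
-- ===== SOURCE B (Python) =====
-- EXCLUDED_NAMESPACES = frozenset({
--     'Wikipedia', 'Help', 'Category', 'File', 'Template', 'Template_talk',
--     'Portal', 'Portal_talk', 'Special', 'Talk', 'User', 'User_talk',
--     'Wikipedia_talk', 'MediaWiki', 'MediaWiki_talk', 'Module', 'Module_talk',
--     'Draft', 'Draft_talk',
-- })
--
--
-- def is_valid_article_link(href: str) -> bool:
--     """
--     Check if a link is a valid Wikipedia article link.
--     Filters out meta pages, navigation links, etc.
--     """
--     if not href.startswith('/wiki/'):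
--         return False
--     namespace, sep, _ = href[6:].partition(':')
--     return not (sep and namespace in EXCLUDED_NAMESPACES)
-- ===== Notes on version B (the rewrite author's own statement) =====
-- stated objective: simpler
-- what changed: B replaces A's 19 startswith prefix scans with a single split of the part after the wiki prefix at the first colon followed by one namespace lookup in a frozenset, and drops A's dead anchor-handling block (it rebinds a local that is never read).
import Mathlib
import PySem

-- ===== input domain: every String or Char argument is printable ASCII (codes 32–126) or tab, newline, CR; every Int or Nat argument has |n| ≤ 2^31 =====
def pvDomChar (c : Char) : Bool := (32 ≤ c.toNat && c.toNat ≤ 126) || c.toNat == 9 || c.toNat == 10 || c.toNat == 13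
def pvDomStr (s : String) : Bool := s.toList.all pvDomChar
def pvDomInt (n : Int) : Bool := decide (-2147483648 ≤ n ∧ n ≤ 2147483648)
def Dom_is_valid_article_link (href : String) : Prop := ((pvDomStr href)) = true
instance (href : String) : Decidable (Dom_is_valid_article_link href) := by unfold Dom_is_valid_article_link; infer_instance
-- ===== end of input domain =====

-- B replaces A's 19 startswith scans by one split at the first ':' and a namespace-set lookup,
-- and drops A's dead anchor-handling block (simpler; same return value on every input).

-- ===== PORT A =====
def pvExcludedPrefixes : List String :=
  ["/wiki/Wikipedia:", "/wiki/Help:", "/wiki/Category:", "/wiki/File:",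
   "/wiki/Template:", "/wiki/Template_talk:", "/wiki/Portal:", "/wiki/Portal_talk:",
   "/wiki/Special:", "/wiki/Talk:", "/wiki/User:", "/wiki/User_talk:",
   "/wiki/Wikipedia_talk:", "/wiki/MediaWiki:", "/wiki/MediaWiki_talk:",
   "/wiki/Module:", "/wiki/Module_talk:", "/wiki/Draft:", "/wiki/Draft_talk:"]

def is_valid_article_link (href : String) : Bool :=
  -- `if not href or not href.startswith('/wiki/'): return False`
  if href.toList.isEmpty || !PySem.Str.startswith href "/wiki/" then false
  -- `for prefix in excluded_prefixes: if href.startswith(prefix): return False`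
  else if pvExcludedPrefixes.any (fun p => PySem.Str.startswith href p) then false
  else
    -- anchor block: rebinds the local `href`, which is never used afterwards
    let _href :=
      if PySem.Str.isIn "#" href && decide (PySem.Str.find href "#" < (PySem.Str.len href : Int) - 1)
      then (((PySem.Str.split? href "#").getD []).headD "") else href
    true

-- ===== PORT B =====
def pvExcludedNamespaces : List String :=
  ["Wikipedia", "Help", "Category", "File", "Template", "Template_talk",
   "Portal", "Portal_talk", "Special", "Talk", "User", "User_talk",
   "Wikipedia_talk", "MediaWiki", "MediaWiki_talk", "Module", "Module_talk",
   "Draft", "Draft_talk"]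

def is_valid_article_link_alt (href : String) : Bool :=
  if !PySem.Str.startswith href "/wiki/" then false
  else
    -- `href[6:].partition(':')` ported by hand on the char list (exact: ':' is one char):
    -- namespace = part before the first ':', sep nonempty iff a ':' occurs
    let rest := href.toList.drop 6
    let ns := rest.takeWhile (fun c => decide (c ≠ ':'))
    -- `return not (sep and namespace in EXCLUDED_NAMESPACES)`
    if rest.contains ':' then !pvExcludedNamespaces.contains (String.ofList ns)
    else true

-- ===== PRECONDITION & SPEC =====
def Spec_is_valid_article_link (href : String) (out : Bool) : Prop := out = is_valid_article_link_alt href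
instance (href : String) (out : Bool) : Decidable (Spec_is_valid_article_link href out) := by unfold Spec_is_valid_article_link; infer_instance

-- ===== CLAIM (what is proved, stated in full; the proofs are below) =====
def Claim_equal_is_valid_article_link : Prop := ∀ (href : String), Dom_is_valid_article_link href → Spec_is_valid_article_link href (is_valid_article_link href)

-- ===== LEMMAS AND PROOFS =====

lemma takeWhile_colon (m t : List Char) (hm : ':' ∉ m) :
    (m ++ ':' :: t).takeWhile (fun c => decide (c ≠ ':')) = m := by
  induction m with
  | nil => simp
  | cons a as ih =>
      have ha : a ≠ ':' := fun h => hm (h ▸ List.mem_cons_self)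
      have has : ':' ∉ as := fun h => hm (List.mem_cons_of_mem _ h)
      rw [List.cons_append, List.takeWhile_cons,
          if_pos (show (fun c => decide (c ≠ ':')) a = true by simp [ha]), ih has]

lemma any_congr_mem {α : Type} {l : List α} {p q : α → Bool}
    (h : ∀ a ∈ l, p a = q a) : l.any p = l.any q := by
  induction l with
  | nil => rfl
  | cons a as ih =>
      simp only [List.any_cons, h a List.mem_cons_self,
        ih (fun b hb => h b (List.mem_cons_of_mem _ hb))]

-- characterisation of "rest starts with <colon-free name> followed by ':'"
lemma prefix_colon_iff (n rest : List Char) (hn : ':' ∉ n) :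
    (n ++ [':']) <+: rest ↔
      (':' ∈ rest ∧ rest.takeWhile (fun c => decide (c ≠ ':')) = n) := by
  constructor
  · rintro ⟨t, rfl⟩
    rw [List.append_assoc]
    simp only [List.singleton_append]
    exact ⟨by simp, takeWhile_colon n t hn⟩
  · rintro ⟨hc, htw⟩
    have hsplit := List.takeWhile_append_dropWhile
      (p := fun c => decide (c ≠ ':')) (l := rest)
    have hdw : rest.dropWhile (fun c => decide (c ≠ ':')) ≠ [] := by
      intro hnil
      rw [hnil, List.append_nil] at hsplit
      rw [← hsplit, htw] at hc
      exact hn hc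
    obtain ⟨d, ds, hds⟩ := List.exists_cons_of_ne_nil hdw
    have hd : d = ':' := by
      have h := List.head_dropWhile_not (fun c => decide (c ≠ ':')) hdw
      have h2 : (rest.dropWhile (fun c => decide (c ≠ ':'))).head? = some d := by
        rw [hds]; rfl
      rw [List.head?_eq_some_head hdw] at h2
      rw [Option.some.inj h2] at h
      simpa using h
    refine ⟨ds, ?_⟩
    rw [← hsplit, htw, hds, hd]
    simp

lemma startswith_wiki_name (href n : String) (hn : ':' ∉ n.toList) (rest : List Char)
    (hl : href.toList = "/wiki/".toList ++ rest) :
    PySem.Str.startswith href ("/wiki/" ++ n ++ ":")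
      = (decide (':' ∈ rest) &&
         ((String.ofList (rest.takeWhile (fun c => decide (c ≠ ':')))) == n)) := by
  have htl : ("/wiki/" ++ n ++ ":").toList = "/wiki/".toList ++ (n.toList ++ [':']) := by
    simp
  rw [Bool.eq_iff_iff, Bool.and_eq_true, decide_eq_true_eq, beq_iff_eq]
  rw [PySem.Str.startswith_eq, PySem.Chars.startswith_iff, htl, hl,
      List.prefix_append_right_inj, prefix_colon_iff _ _ hn]
  constructor
  · rintro ⟨hc, htw⟩
    exact ⟨hc, by rw [htw, String.ofList_toList]⟩
  · rintro ⟨hc, htw⟩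
    refine ⟨hc, ?_⟩
    have h := congrArg String.toList htw
    simpa using h

lemma ports_agree (href : String) :
    is_valid_article_link href = is_valid_article_link_alt href := by
  by_cases hs : PySem.Str.startswith href "/wiki/" = true
  · have hpre : "/wiki/".toList <+: href.toList := by
      have h := hs
      rw [PySem.Str.startswith_eq] at h
      exact (PySem.Chars.startswith_iff _ _).mp h
    obtain ⟨t, ht⟩ := hpre
    have hdrop : href.toList.drop 6 = t := by rw [← ht]; rfl
    have hl : href.toList = "/wiki/".toList ++ t := ht.symm
    have hne : href.toList.isEmpty = false := by rw [← ht]; rfl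
    unfold is_valid_article_link is_valid_article_link_alt
    rw [hs, hne, hdrop]
    simp only [Bool.not_true, Bool.or_false, if_false, Bool.false_eq_true]
    have h19 : ∀ n ∈ pvExcludedNamespaces, ':' ∉ n.toList := by decide
    have hmap : pvExcludedPrefixes = pvExcludedNamespaces.map (fun n => "/wiki/" ++ n ++ ":") := by decide
    rw [hmap, List.any_map]
    have hany : pvExcludedNamespaces.any ((fun p => PySem.Str.startswith href p) ∘ (fun n => "/wiki/" ++ n ++ ":"))
        = (decide (':' ∈ t) &&
           pvExcludedNamespaces.contains
             (String.ofList (t.takeWhile (fun c => decide (c ≠ ':'))))) := by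
      have h1 : pvExcludedNamespaces.any ((fun p => PySem.Str.startswith href p) ∘ (fun n => "/wiki/" ++ n ++ ":"))
          = pvExcludedNamespaces.any (fun n => decide (':' ∈ t) &&
              ((String.ofList (t.takeWhile (fun c => decide (c ≠ ':')))) == n)) :=
        any_congr_mem (fun n hn => startswith_wiki_name href n (h19 n hn) t hl)
      rw [h1, List.contains_eq_any_beq]
      exact Eq.symm List.and_any_distrib_left
    rw [hany]
    by_cases hc : ':' ∈ t
    · have hct : t.contains ':' = true := by simpa using hc
      simp only [hc, decide_true, Bool.true_and, hct]
      cases hb : pvExcludedNamespaces.contains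
          (String.ofList (t.takeWhile (fun c => decide (c ≠ ':')))) <;> simp
    · have hct : t.contains ':' = false := by simpa using hc
      simp [hc]
  · unfold is_valid_article_link is_valid_article_link_alt
    rw [Bool.eq_false_iff.mpr hs]
    simp

-- ===== VERDICT (by name: the statement is the Claim_ definition above) =====
theorem is_valid_article_link_spec : Claim_equal_is_valid_article_link := by
  intro href _
  unfold Spec_is_valid_article_link
  exact ports_agree href
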